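-- pv_equiv track=rewrite | github.com/HonestGiftless/Python | 1. Beginner/6. Loops/6.9 nested loops p.2/task_3.py | get_count
-- ===== SOURCE A (Python) =====
-- def get_count(number):
--     result_count = 0
--     result_sum = 0
--
--     for i in range(1, number + 1):
--         if number % i == 0:
--             result_count += 1
--             result_sum += i
--
--     return result_count, result_sum
-- ===== SOURCE B (Python) =====
-- def get_count(number):
--     count = 0
--     total = 0
--     i = 1
--     while i * i <= number:
--         if number % i == 0:
--             count += 1
--             total += i
--             j = number // i
--             if j != i:
--                 count += 1
--                 total += j
--         i += 1
--     return count, total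
-- ===== Notes on version B (the rewrite author's own statement) =====
-- stated objective: faster
-- what changed: Replaces the O(n) scan over 1..n with a loop up to sqrt(n) that adds each small divisor i together with its cofactor n//i (once when i*i == n).
import Mathlib
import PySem

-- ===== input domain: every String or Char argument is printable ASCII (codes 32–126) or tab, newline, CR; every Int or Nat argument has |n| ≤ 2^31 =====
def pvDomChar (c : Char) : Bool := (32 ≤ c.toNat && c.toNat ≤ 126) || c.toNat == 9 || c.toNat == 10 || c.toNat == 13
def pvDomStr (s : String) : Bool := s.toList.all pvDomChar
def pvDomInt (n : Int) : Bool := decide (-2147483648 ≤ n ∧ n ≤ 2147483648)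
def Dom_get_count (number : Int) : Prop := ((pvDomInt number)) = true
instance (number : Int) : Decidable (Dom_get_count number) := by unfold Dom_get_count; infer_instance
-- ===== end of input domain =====

-- B replaces A's O(n) scan over 1..n by a loop up to sqrt(n) adding each small divisor i and its cofactor n//i.

-- ===== PORT A =====
def get_count (number : Int) : List Int :=
  let st := (PySem.List.pyRange 1 (number + 1) 1).foldl
    (fun (st : Int × Int) i =>
      if PySem.Int.mod number i == 0 then (st.1 + 1, st.2 + i) else st)
    (0, 0)
  [st.1, st.2]

-- ===== PORT B =====
-- the 'while i * i <= number' loop of Source B; fuel is a totality guard only: the loop runs at most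
-- sqrt(number)+1 <= number.toNat+1 times, so the fuel is never exhausted
def get_count_alt_loop (number : Int) : Nat → Int → Int → Int → Int × Int
  | 0, _, count, total => (count, total)
  | fuel + 1, i, count, total =>
    if i * i ≤ number then
      if PySem.Int.mod number i == 0 then
        let j := PySem.Int.floordiv number i
        if j ≠ i then get_count_alt_loop number fuel (i + 1) (count + 1 + 1) (total + i + j)
        else get_count_alt_loop number fuel (i + 1) (count + 1) (total + i)
      else get_count_alt_loop number fuel (i + 1) count total
    else (count, total)

def get_count_alt (number : Int) : List Int :=
  let st := get_count_alt_loop number (number.toNat + 1) 1 0 0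
  [st.1, st.2]

-- ===== PRECONDITION & SPEC =====
def Spec_get_count (number : Int) (out : List Int) : Prop := out = get_count_alt number
instance (number : Int) (out : List Int) : Decidable (Spec_get_count number out) := by unfold Spec_get_count; infer_instance

-- ===== CLAIM (what is proved, stated in full; the proofs are below) =====
def Claim_equal_get_count : Prop := ∀ (number : Int), Dom_get_count number → Spec_get_count number (get_count number)

-- ===== LEMMAS AND PROOFS =====

-- the divisor predicate, A's divisor list (1..m), B's small-divisor lists (1..sqrt m), on the Nat side
def pvP (m : Nat) : Nat → Bool := fun d => m % d == 0
def pvD (m : Nat) : List Nat := (List.range' 1 m).filter (pvP m)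
def pvS (m : Nat) : List Nat := (List.range' 1 (Nat.sqrt m)).filter (pvP m)
def pvS' (m : Nat) : List Nat := (pvS m).filter (fun d => decide (m / d ≠ d))

theorem pyRange_cast (m : Nat) : PySem.List.pyRange 1 ((m:ℤ)+1) 1 = (List.range' 1 m).map (fun (d : Nat) => (d:ℤ)) := by
  apply List.ext_getElem
  · simp [PySem.List.length_pyRange_one]
  · intro k h1 h2
    simp [PySem.List.getElem_pyRange_one, List.getElem_range']

-- A's fold accumulates (count, sum) of the filtered list
theorem pvFoldA (q : Int → Bool) (l : List Int) (c s : Int) :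
    l.foldl (fun (st : Int × Int) i => if q i then (st.1 + 1, st.2 + i) else st) (c, s)
    = (c + (l.filter q).length, s + (l.filter q).sum) := by
  induction l generalizing c s with
  | nil => simp
  | cons x xs ih =>
    by_cases hx : q x <;> simp [hx, ih] <;> constructor <;> ring

theorem pvA_char (m : Nat) :
    get_count (m : Int) = [((pvD m).length : Int), ((pvD m).sum : Int)] := by
  unfold get_count
  rw [pyRange_cast, pvFoldA]
  have hf : ((List.range' 1 m).map (fun (d : Nat) => (d:ℤ))).filter (fun i => PySem.Int.mod (m:ℤ) i == 0)
      = (pvD m).map (fun (d : Nat) => (d:ℤ)) := by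
    rw [List.filter_map]
    unfold pvD
    congr 1
    apply List.filter_congr
    intro d hd
    have hd1 : 0 < d := (List.mem_range'_1.mp hd).1
    simp [Function.comp, PySem.Int.mod_natCast, pvP, Int.natCast_dvd_natCast, Nat.dvd_iff_mod_eq_zero]
  rw [hf]
  simp [Nat.cast_list_sum]

-- B's loop from i collects the divisors among i..sqrt m, each with its cofactor when distinct
theorem pvLoopB (m : Nat) : ∀ (fuel i : Nat) (c s : Int), 1 ≤ i → Nat.sqrt m + 1 - i ≤ fuel →
    get_count_alt_loop (m:ℤ) fuel (i:ℤ) c s =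
      (c + (((List.range' i (Nat.sqrt m + 1 - i)).filter (pvP m)).length : ℤ)
         + ((((List.range' i (Nat.sqrt m + 1 - i)).filter (pvP m)).filter (fun d => decide (m / d ≠ d))).length : ℤ),
       s + (((List.range' i (Nat.sqrt m + 1 - i)).filter (pvP m)).sum : ℤ)
         + (((((List.range' i (Nat.sqrt m + 1 - i)).filter (pvP m)).filter (fun d => decide (m / d ≠ d))).map (fun d => m / d)).sum : ℤ)) := by
  intro fuel
  induction fuel with
  | zero =>
    intro i c s hi hn
    have h0 : Nat.sqrt m + 1 - i = 0 := by omega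
    rw [get_count_alt_loop, h0]
    simp
  | succ fuel ih =>
    intro i c s hi hn
    by_cases hiK : i ≤ Nat.sqrt m
    case neg =>
      have h0 : Nat.sqrt m + 1 - i = 0 := by omega
      have hcond : ¬ ((i:ℤ) * (i:ℤ) ≤ (m:ℤ)) := by
        have : ¬ (i * i ≤ m) := fun hle => absurd (Nat.le_sqrt.mpr hle) (by omega)
        exact_mod_cast this
      rw [get_count_alt_loop, if_neg hcond, h0]
      simp
    case pos =>
    have hii : i * i ≤ m := Nat.le_sqrt.mp hiK
    have hcond : ((i:ℤ) * (i:ℤ) ≤ (m:ℤ)) := by exact_mod_cast hii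
    rw [get_count_alt_loop, if_pos hcond]
    have hstep : ((i:ℤ) + 1) = ((i + 1 : Nat) : ℤ) := by push_cast; ring
    have hn' : Nat.sqrt m + 1 - i = (Nat.sqrt m + 1 - (i+1)) + 1 := by omega
    have hrange : List.range' i (Nat.sqrt m + 1 - i) = i :: List.range' (i+1) (Nat.sqrt m + 1 - (i+1)) := by
      rw [hn']; exact List.range'_succ ..
    have hrec := fun c s => ih (i+1) c s (by omega) (by omega)
    by_cases hp : m % i = 0
    · have hj : PySem.Int.floordiv (m:ℤ) (i:ℤ) = ((m / i : Nat) : ℤ) := PySem.Int.floordiv_natCast m i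
      simp only [PySem.Int.mod_natCast, hp, Nat.cast_zero, beq_self_eq_true, if_true, hj]
      by_cases hne : m / i = i
      · rw [if_neg (by exact_mod_cast fun h => (by simp [hne] at h : False)), hstep, hrec]
        rw [hrange]
        simp [pvP, hp, hne, Prod.ext_iff]
        constructor <;> ring
      · rw [if_pos (by exact_mod_cast hne), hstep, hrec]
        rw [hrange]
        simp [pvP, hp, hne, Prod.ext_iff]
        constructor <;> ring
    · have hmod : ¬ ((PySem.Int.mod (m:ℤ) (i:ℤ) == 0) = true) := by
        simp [PySem.Int.mod_natCast, Int.natCast_dvd_natCast, Nat.dvd_iff_mod_eq_zero, hp]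
      rw [if_neg hmod]
      rw [hstep, hrec, hrange]
      simp [pvP, hp]

theorem pvB_char (m : Nat) :
    get_count_alt (m : Int) =
      [((pvS m).length : Int) + ((pvS' m).length : Int),
       ((pvS m).sum : Int) + ((((pvS' m).map (fun d => m / d)).sum : Nat) : Int)] := by
  unfold get_count_alt
  have h := pvLoopB m (m + 1) 1 0 0 (by omega) (by have := Nat.sqrt_le_self m; omega)
  norm_num at h
  simp only [Int.toNat_natCast]
  rw [h]
  simp [pvS, pvS']

-- ===== the sqrt-pairing bijection =====
theorem pvD_nodup (m : Nat) : (pvD m).Nodup := (List.nodup_range' ..).filter _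
theorem pvS_nodup (m : Nat) : (pvS m).Nodup := (List.nodup_range' ..).filter _
theorem pvS'_nodup (m : Nat) : (pvS' m).Nodup := (pvS_nodup m).filter _

theorem pvD_toFinset (m : Nat) (hm : 1 ≤ m) : (pvD m).toFinset = m.divisors := by
  ext d
  simp [pvD, pvP, List.mem_range'_1, Nat.mem_divisors, ← Nat.dvd_iff_mod_eq_zero]
  constructor
  · rintro ⟨⟨h1, h2⟩, h3⟩; exact ⟨h3, by omega⟩
  · rintro ⟨h1, h2⟩
    have hd0 : 0 < d := Nat.pos_of_dvd_of_pos h1 hm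
    have := Nat.le_of_dvd hm h1
    exact ⟨⟨hd0, by omega⟩, h1⟩

theorem pvS_toFinset (m : Nat) (hm : 1 ≤ m) :
    (pvS m).toFinset = m.divisors.filter (fun d => d * d ≤ m) := by
  ext d
  simp [pvS, pvP, List.mem_range'_1, Nat.mem_divisors, ← Nat.dvd_iff_mod_eq_zero]
  constructor
  · rintro ⟨⟨h1, h2⟩, h3⟩
    exact ⟨⟨h3, by omega⟩, Nat.le_sqrt.mp (by omega)⟩
  · rintro ⟨⟨h1, h2⟩, h3⟩
    have hd0 : 0 < d := Nat.pos_of_dvd_of_pos h1 hm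
    have := Nat.le_sqrt.mpr h3
    exact ⟨⟨hd0, by omega⟩, h1⟩

theorem pvS'_toFinset (m : Nat) (hm : 1 ≤ m) :
    (pvS' m).toFinset = m.divisors.filter (fun d => d * d < m) := by
  have h := pvS_toFinset m hm
  ext d
  simp [pvS', ← List.mem_toFinset (l := pvS m), h, Nat.mem_divisors]
  constructor
  · rintro ⟨⟨⟨hdvd, hm0⟩, h1⟩, h2⟩
    have hd0 : 0 < d := Nat.pos_of_dvd_of_pos hdvd hm
    have hmul : d * (m / d) = m := Nat.mul_div_cancel' hdvd
    refine ⟨⟨hdvd, hm0⟩, ?_⟩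
    rcases Nat.lt_or_ge (d * d) m with h3 | h3
    · exact h3
    · exfalso; apply h2
      have heq : d * d = m := by omega
      exact Nat.eq_of_mul_eq_mul_left hd0 (hmul.trans heq.symm)
  · rintro ⟨⟨hdvd, hm0⟩, h1⟩
    have hmul : d * (m / d) = m := Nat.mul_div_cancel' hdvd
    refine ⟨⟨⟨hdvd, hm0⟩, by omega⟩, fun h2 => ?_⟩
    rw [h2] at hmul; omega

theorem pvImage (m : Nat) (hm : 1 ≤ m) :
    m.divisors.filter (fun d => ¬ d * d ≤ m) =
      (m.divisors.filter (fun d => d * d < m)).image (fun d => m / d) := by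
  ext e
  simp [Nat.mem_divisors, Finset.mem_image]
  constructor
  · rintro ⟨⟨he, hm0⟩, hlt⟩
    have he0 : 0 < e := Nat.pos_of_dvd_of_pos he hm
    refine ⟨m / e, ⟨⟨Nat.div_dvd_of_dvd he, hm0⟩, ?_⟩, Nat.div_div_self he hm0⟩
    have hmul : e * (m / e) = m := Nat.mul_div_cancel' he
    have hk : m / e < e := by nlinarith [Nat.mul_div_cancel' he]
    nlinarith [Nat.mul_div_cancel' he, Nat.pos_of_dvd_of_pos (Nat.div_dvd_of_dvd he) hm]
  · rintro ⟨d, ⟨⟨hd, hm0⟩, hlt⟩, rfl⟩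
    have hd0 : 0 < d := Nat.pos_of_dvd_of_pos hd hm
    have hmul : d * (m / d) = m := Nat.mul_div_cancel' hd
    refine ⟨⟨Nat.div_dvd_of_dvd hd, hm0⟩, ?_⟩
    have hk : d < m / d := by nlinarith
    nlinarith

theorem pvInjOn (m : Nat) :
    Set.InjOn (fun d => m / d) (m.divisors.filter (fun d => d * d < m)) := by
  intro a ha b hb hab
  simp [Nat.mem_divisors] at ha hb hab
  have h1 : m / (m / a) = a := Nat.div_div_self ha.1.1 ha.1.2
  have h2 : m / (m / b) = b := Nat.div_div_self hb.1.1 hb.1.2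
  rw [hab] at h1
  omega

theorem pvBij_len (m : Nat) (hm : 1 ≤ m) :
    (pvD m).length = (pvS m).length + (pvS' m).length := by
  rw [← List.toFinset_card_of_nodup (pvD_nodup m),
      ← List.toFinset_card_of_nodup (pvS_nodup m),
      ← List.toFinset_card_of_nodup (pvS'_nodup m),
      pvD_toFinset m hm, pvS_toFinset m hm, pvS'_toFinset m hm]
  rw [← Finset.filter_card_add_filter_neg_card_eq_card (p := fun d => d * d ≤ m) (s := m.divisors)]
  congr 1
  rw [pvImage m hm, Finset.card_image_of_injOn (pvInjOn m)]

theorem pvBij_sum (m : Nat) (hm : 1 ≤ m) :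
    (pvD m).sum = (pvS m).sum + ((pvS' m).map (fun d => m / d)).sum := by
  have hD := List.sum_toFinset (f := id) (pvD_nodup m)
  have hS := List.sum_toFinset (f := id) (pvS_nodup m)
  have hS' := List.sum_toFinset (f := fun d => m / d) (pvS'_nodup m)
  simp only [List.map_id] at hD hS
  have hsum : (∑ d ∈ (pvD m).toFinset, id d) = (∑ d ∈ (pvS m).toFinset, id d) + (∑ d ∈ (pvS' m).toFinset, m / d) := by
    rw [pvD_toFinset m hm, pvS_toFinset m hm, pvS'_toFinset m hm]
    rw [← Finset.sum_filter_add_sum_filter_not m.divisors (fun d => d * d ≤ m) id]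
    congr 1
    rw [pvImage m hm]
    exact Finset.sum_image (fun x hx y hy h => pvInjOn m hx hy h)
  rw [hD, hS] at hsum
  rw [hsum, hS']

-- ===== VERDICT (by name: the statement is the Claim_ definition above) =====
theorem get_count_spec : Claim_equal_get_count := by
  intro number _
  unfold Spec_get_count
  rcases (by omega : number ≤ 0 ∨ 0 < number) with hn | hn
  · unfold get_count get_count_alt
    have hfuel : number.toNat + 1 = 1 := by omega
    rw [PySem.List.pyRange_one_eq_nil (by omega), hfuel, get_count_alt_loop, if_neg (by nlinarith)]
    simp
  · have h : number = ((number.toNat : Nat) : Int) := by omega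
    rw [h, pvA_char, pvB_char, pvBij_len _ (by omega), pvBij_sum _ (by omega)]
    push_cast
    ring_nf
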